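-- pv_equiv track=rewrite | github.com/DCBIA-OrthoLab/SlicerAutomatedDentalTools | VFACE/VFACE_utils/Measure.py | check_skeletal
-- ===== SOURCE A (Python) =====
-- def check_skeletal(list_landmark : list, tocheck : list) -> bool:
--     '''same utilities as check but more for skeletal. It handle the case where 'B' in 'Ba' and 'Ba' in 'Ba' that ending with a false counting in check.
--     '''
--     for landmark in list_landmark:
--         if "Mid_" in landmark:
--             components = landmark.split("_")[1:]
--             if not all(component in tocheck for component in components):
--                 return False
--
--         elif landmark not in tocheck:
--             return False
--     return True
-- ===== SOURCE B (Python) =====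
-- def check_skeletal(list_landmark: list, tocheck: list) -> bool:
--     '''Sort-then-merge: gather all required names, sort them, sort the distinct
--     available names, then verify inclusion with a single two-pointer merge scan.'''
--     required = []
--     for landmark in list_landmark:
--         if "Mid_" in landmark:
--             required.extend(landmark.split("_")[1:])
--         else:
--             required.append(landmark)
--     required.sort()
--     have = sorted(set(tocheck))
--     i = 0
--     for r in required:
--         while i < len(have) and have[i] < r:
--             i += 1
--         if i == len(have) or have[i] != r:
--             return False
--     return True
-- ===== Notes on version B (the rewrite author's own statement) =====
-- stated objective: alternative
-- what changed: Replaces A's nested membership scans (each required name searched linearly in tocheck) by a sort-then-merge algorithm: gather all required names, sort them, sort the distinct tocheck names, and verify inclusion with one two-pointer merge scan.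
import Mathlib
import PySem

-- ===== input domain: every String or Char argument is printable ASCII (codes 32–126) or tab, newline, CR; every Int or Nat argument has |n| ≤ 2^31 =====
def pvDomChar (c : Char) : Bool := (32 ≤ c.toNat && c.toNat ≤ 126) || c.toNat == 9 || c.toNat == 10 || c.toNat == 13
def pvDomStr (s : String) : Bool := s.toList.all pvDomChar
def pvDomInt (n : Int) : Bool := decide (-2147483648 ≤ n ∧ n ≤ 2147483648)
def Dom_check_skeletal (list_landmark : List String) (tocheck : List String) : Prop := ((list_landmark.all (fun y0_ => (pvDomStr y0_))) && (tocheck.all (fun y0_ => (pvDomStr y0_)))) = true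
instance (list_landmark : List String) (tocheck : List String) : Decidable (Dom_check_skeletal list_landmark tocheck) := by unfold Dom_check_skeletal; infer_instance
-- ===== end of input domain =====

-- ===== PORT A =====
def check_skeletal (list_landmark : List String) (tocheck : List String) : Bool :=
  match list_landmark with
  | [] => true
  | landmark :: rest =>
    if PySem.Str.isIn "Mid_" landmark then
      let components := PySem.List.slice ((PySem.Str.split? landmark "_").getD []) (some 1) none
      if !(components.all (fun component => tocheck.contains component)) then false
      else check_skeletal rest tocheck
    else if !(tocheck.contains landmark) then false
    else check_skeletal rest tocheck

-- ===== PORT B =====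
-- B is a different algorithm: gather all required names, sort them, sort the distinct
-- available names (sorted(set(tocheck))), then verify inclusion with one two-pointer merge scan.
def pvGather (list_landmark : List String) : List String :=
  list_landmark.foldl (fun required landmark =>
    if PySem.Str.isIn "Mid_" landmark then
      required ++ PySem.List.slice ((PySem.Str.split? landmark "_").getD []) (some 1) none
    else required ++ [landmark]) []

-- the 'for r in required' loop with the inner 'while' advancing the pointer (modelled by dropWhile)
def pvScan : List String → List String → Bool
  | [], _ => true
  | r :: rs, hv =>
    match hv.dropWhile (fun h => decide (h < r)) with
    | [] => false
    | h :: t => if h ≠ r then false else pvScan rs (h :: t)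

def check_skeletal_alt (list_landmark : List String) (tocheck : List String) : Bool :=
  let required := PySem.List.sorted (pvGather list_landmark) (fun x => x) false
  let haveList := PySem.List.sorted (PySem.Set.ofList tocheck) (fun x => x) false
  pvScan required haveList

-- ===== PRECONDITION & SPEC =====
def Spec_check_skeletal (list_landmark : List String) (tocheck : List String) (out : Bool) : Prop := out = check_skeletal_alt list_landmark tocheck
instance (list_landmark : List String) (tocheck : List String) (out : Bool) : Decidable (Spec_check_skeletal list_landmark tocheck out) := by unfold Spec_check_skeletal; infer_instance

-- ===== CLAIM (what is proved, stated in full; the proofs are below) =====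
def Claim_equal_check_skeletal : Prop := ∀ (list_landmark : List String) (tocheck : List String), Dom_check_skeletal list_landmark tocheck → Spec_check_skeletal list_landmark tocheck (check_skeletal list_landmark tocheck)

-- ===== LEMMAS AND PROOFS =====
theorem pvGather_shift (list_landmark : List String) (acc : List String) :
    list_landmark.foldl (fun required landmark =>
      if PySem.Str.isIn "Mid_" landmark then
        required ++ PySem.List.slice ((PySem.Str.split? landmark "_").getD []) (some 1) none
      else required ++ [landmark]) acc = acc ++ pvGather list_landmark := by
  induction list_landmark generalizing acc with
  | nil => simp [pvGather]
  | cons l rest ih =>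
    simp only [pvGather, List.foldl_cons]
    rw [ih, ih]
    split <;> simp

theorem pvGather_cons (l : String) (rest : List String) :
    pvGather (l :: rest) =
      (if PySem.Str.isIn "Mid_" l then
        PySem.List.slice ((PySem.Str.split? l "_").getD []) (some 1) none
      else [l]) ++ pvGather rest := by
  simp only [pvGather, List.foldl_cons]
  rw [pvGather_shift]
  split <;> simp [pvGather]

-- A equals the flat membership check over the gathered requirements
theorem a_eq_all (list_landmark : List String) (tocheck : List String) :
    check_skeletal list_landmark tocheck =
      (pvGather list_landmark).all (fun r => tocheck.contains r) := by
  induction list_landmark with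
  | nil => simp [check_skeletal, pvGather]
  | cons l rest ih =>
    rw [pvGather_cons]
    unfold check_skeletal
    split
    · simp only [List.all_append]
      by_cases h : (((PySem.List.slice ((PySem.Str.split? l "_").getD []) (some 1) none).all
          (fun component => tocheck.contains component)) = true)
      · rw [h]; simp [ih]
      · simp only [Bool.not_eq_true] at h
        rw [h]; simp
    · simp only [List.all_append, List.all_cons, List.all_nil, Bool.and_true]
      by_cases h : tocheck.contains l = true
      · rw [h]; simp [ih]
      · simp only [Bool.not_eq_true] at h
        rw [h]; simp

-- all over a list depends only on the predicate's values on its members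
theorem pvAllCongrMem {α : Type} {l : List α} {p q : α → Bool}
    (h : ∀ x ∈ l, p x = q x) : l.all p = l.all q := by
  induction l with
  | nil => rfl
  | cons a l ih =>
    simp only [List.all_cons, h a (List.mem_cons_self), ih (fun x hx => h x (List.mem_cons_of_mem a hx))]

-- the merge scan over a weakly sorted requirement list and a strictly sorted available list
-- computes exactly the membership check
theorem scan_correct (r : List String) (hv : List String)
    (hr : r.Pairwise (· ≤ ·)) (hhv : hv.Pairwise (· < ·)) :
    pvScan r hv = r.all (fun x => hv.contains x) := by
  induction r generalizing hv with
  | nil => simp [pvScan]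
  | cons x rs ih =>
    have hsplit := List.takeWhile_append_dropWhile (p := fun h => decide (h < x)) (l := hv)
    have htake : ∀ y ∈ hv.takeWhile (fun h => decide (h < x)), y < x := by
      intro y hy
      have := List.mem_takeWhile_imp hy
      simpa using this
    have hmem : ∀ z : String, x ≤ z →
        (hv.contains z = (hv.dropWhile (fun h => decide (h < x))).contains z) := by
      intro z hz
      simp only [List.contains_eq_mem]
      rw [decide_eq_decide]
      constructor
      · intro hzin
        rw [← hsplit] at hzin
        rcases List.mem_append.1 hzin with h1 | h2
        · exact absurd (htake z h1) (not_lt.2 hz)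
        · exact h2
      · intro hzin
        rw [← hsplit]
        exact List.mem_append.2 (Or.inr hzin)
    have hdrop : (hv.dropWhile (fun h => decide (h < x))).Pairwise (· < ·) :=
      hhv.sublist (List.dropWhile_sublist _)
    rcases hd : hv.dropWhile (fun h => decide (h < x)) with _ | ⟨h, t⟩
    · -- pointer ran off the end: x is not available
      have hc : hv.contains x = false := by
        rw [hmem x le_rfl, hd]; rfl
      simp only [pvScan, hd, List.all_cons, hc, Bool.false_and]
    · have hhead : ¬ (h < x) := by
        have hne : hv.dropWhile (fun h => decide (h < x)) ≠ [] := by rw [hd]; simp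
        have := List.head_dropWhile_not (fun h => decide (h < x)) hne
        have hh : (hv.dropWhile (fun h => decide (h < x))).head hne = h := by
          simp only [hd, List.head_cons]
        rw [hh] at this
        simpa using this
      by_cases hex : h = x
      · subst hex
        have hx : hv.contains h = true := by
          rw [hmem h le_rfl, hd]
          simp [List.contains_eq_mem]
        have hrs : rs.Pairwise (· ≤ ·) := hr.of_cons
        have hxle : ∀ z ∈ rs, h ≤ z := fun z hz => (List.pairwise_cons.1 hr).1 z hz
        have hdrop' : (h :: t).Pairwise (· < ·) := hd ▸ hdrop
        have hall : rs.all (fun z => (h :: t).contains z) = rs.all (fun z => hv.contains z) := by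
          apply pvAllCongrMem
          intro z hz
          rw [hmem z (hxle z hz), hd]
        simp only [pvScan, hd, ne_eq, not_true_eq_false, if_false, List.all_cons, hx,
          Bool.true_and]
        rw [ih (h :: t) hrs hdrop', hall]
      · -- head is strictly above x: x is not available
        have hlt : x < h := lt_of_le_of_ne (not_lt.1 hhead) (Ne.symm hex)
        have hnx : x ∉ (h :: t) := by
          intro hxin
          rcases List.mem_cons.1 hxin with h1 | h2
          · exact hex h1.symm
          · have : h < x := (List.pairwise_cons.1 (hd ▸ hdrop)).1 x h2
            exact hhead this
        have hc : hv.contains x = false := by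
          rw [hmem x le_rfl, hd]
          simp only [List.contains_eq_mem]
          exact decide_eq_false hnx
        simp only [pvScan, hd, ne_eq, hex, not_false_eq_true, if_true, List.all_cons, hc,
          Bool.false_and]

theorem key_lemma (list_landmark : List String) (tocheck : List String) :
    check_skeletal list_landmark tocheck = check_skeletal_alt list_landmark tocheck := by
  rw [a_eq_all]
  unfold check_skeletal_alt
  rw [scan_correct _ _ (PySem.List.sorted_pairwise _ _) (PySem.List.sorted_ofList_pairwise_lt _)]
  rw [List.Perm.all_eq (PySem.List.sorted_perm _ _ false)]
  apply pvAllCongrMem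
  intro z _
  simp only [List.contains_eq_mem]
  rw [decide_eq_decide]
  simp [PySem.List.mem_sorted, PySem.Set.mem_ofList]

-- ===== VERDICT (by name: the statement is the Claim_ definition above) =====
theorem check_skeletal_spec : Claim_equal_check_skeletal := by
  intro l t _
  unfold Spec_check_skeletal
  exact key_lemma l t
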